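-- pv_equiv track=rewrite | github.com/MrBrantCode/unitest_baseline | mut_generate/mist_train_cf/cf_60387/solution.py | convergent
-- ===== SOURCE A (Python) =====
-- def convergent(n):
--     sequence = [2]
--     k = 1
--     while len(sequence) < n:
--         sequence += [1,2*k,1]
--         k += 1
--     P = [0, 1]
--     Q = [1, 0]
--     for a in sequence:
--         P.append(a*P[-1] + P[-2])
--         Q.append(a*Q[-1] + Q[-2])
--     numerator = P[-1]
--     numerator_digits = [int(d) for d in str(numerator)]
--     return sum(numerator_digits)
-- ===== SOURCE B (Python) =====
-- def convergent(n):
--     # closed-form count of the while-loop's (1, 2k, 1) blocks, overshoot included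
--     m = (n + 1) // 3 if n > 1 else 0
--     coeffs = [2] + [c for k in range(1, m + 1) for c in (1, 2 * k, 1)]
--     # evaluate the continued fraction backward with one integer pair
--     num, den = 1, 0
--     for a in reversed(coeffs):
--         num, den = a * num + den, num
--     # decimal digit sum by repeated divmod instead of str()
--     s = 0
--     while num > 0:
--         s += num % 10
--         num //= 10
--     return s
-- ===== Notes on version B (the rewrite author's own statement) =====
-- stated objective: alternative
-- what changed: Replaces the growing while-loop by a closed-form block count with a flat comprehension for the coefficient list, the forward two-sequence P/Q recurrence by a single backward integer-pair fold whose first component is the numerator, and the str()-based digit sum by repeated divmod by 10.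
import Mathlib
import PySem

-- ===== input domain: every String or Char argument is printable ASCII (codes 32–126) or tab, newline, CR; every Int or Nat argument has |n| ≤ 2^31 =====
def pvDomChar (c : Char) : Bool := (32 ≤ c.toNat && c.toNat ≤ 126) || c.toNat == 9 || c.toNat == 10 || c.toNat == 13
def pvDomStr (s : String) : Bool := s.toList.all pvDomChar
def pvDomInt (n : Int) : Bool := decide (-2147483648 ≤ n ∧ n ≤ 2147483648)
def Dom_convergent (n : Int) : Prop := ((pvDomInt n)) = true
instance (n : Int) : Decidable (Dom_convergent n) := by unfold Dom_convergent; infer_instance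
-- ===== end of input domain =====

-- B replaces A's growing while-loop by a closed-form block count with a flat
-- comprehension, the forward P/Q recurrence by a single backward integer-pair
-- fold, and the str()-based digit sum by repeated divmod by 10 (alternative).

-- ===== PORT A =====
-- the Python while-loop building the coefficient list
def buildSeq (n : Int) (seq : List Int) (k : Int) : List Int :=
  if h : (seq.length : Int) < n then buildSeq n (seq ++ [1, 2 * k, 1]) (k + 1) else seq
termination_by (n - seq.length).toNat
decreasing_by
  have h3 : (seq ++ [1, 2 * k, 1]).length = seq.length + 3 := by simp
  omega

-- Python's 'sum(int(d) for d in str(m))'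
-- (int(d) via ofChars?; .getD 0 is unreachable: every char of str(m) for m ≥ 0 is a digit)
def strDigitSum (m : Int) : Int :=
  (((PySem.Int.toStr m).toList).map (fun c => (PySem.Int.ofChars? [c]).getD 0)).sum

def convergent (n : Int) : Int :=
  let seq := buildSeq n [2] 1
  let PQ := seq.foldl (fun (PQ : List Int × List Int) a =>
      (PQ.1 ++ [a * PySem.List.pyGetD PQ.1 (-1) 0 + PySem.List.pyGetD PQ.1 (-2) 0],
       PQ.2 ++ [a * PySem.List.pyGetD PQ.2 (-1) 0 + PySem.List.pyGetD PQ.2 (-2) 0]))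
    ([0, 1], [1, 0])
  let numerator := PySem.List.pyGetD PQ.1 (-1) 0
  strDigitSum numerator

-- ===== PORT B =====
-- Source B's 'while num > 0: s += num % 10; num //= 10'
def digitLoop (s m : Int) : Int :=
  if 0 < m then digitLoop (s + PySem.Int.mod m 10) (PySem.Int.floordiv m 10) else s
termination_by m.toNat
decreasing_by
  rw [PySem.Int.floordiv_eq_ediv_of_pos (by omega)]
  omega

def convergent_alt (n : Int) : Int :=
  let m : Int := if 1 < n then PySem.Int.floordiv (n + 1) 3 else 0
  let coeffs := 2 :: (PySem.List.pyRange 1 (m + 1) 1).flatMap (fun k => [1, 2 * k, 1])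
  let nd := coeffs.reverse.foldl (fun (nd : Int × Int) a => (a * nd.1 + nd.2, nd.1)) (1, 0)
  digitLoop 0 nd.1

-- ===== PRECONDITION & SPEC =====
def Spec_convergent (n : Int) (out : Int) : Prop := out = convergent_alt n
instance (n : Int) (out : Int) : Decidable (Spec_convergent n out) := by unfold Spec_convergent; infer_instance

-- ===== CLAIM (what is proved, stated in full; the proofs are below) =====
def Claim_equal_convergent : Prop := ∀ (n : Int), Dom_convergent n → Spec_convergent n (convergent n)

-- ===== LEMMAS AND PROOFS =====

-- ---- digit sums: str()-based sum = divmod loop, via a common Nat digit sum ----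

def natDSum (n : Nat) : Nat :=
  if h : n < 10 then n else n % 10 + natDSum (n / 10)
decreasing_by omega

lemma dchar_val (d : Nat) (h : d < 10) :
    (PySem.Int.ofChars? [Nat.digitChar d]).getD 0 = (d : Int) := by
  interval_cases d <;> decide

lemma core_sum (fuel : Nat) : ∀ (n : Nat) (acc : List Char), n ≤ fuel →
    ((Nat.toDigitsCore 10 (fuel + 1) n acc).map
      (fun c => (PySem.Int.ofChars? [c]).getD 0)).sum
    = (natDSum n : Int) + ((acc.map (fun c => (PySem.Int.ofChars? [c]).getD 0)).sum) := by
  induction fuel with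
  | zero =>
    intro n acc hn
    interval_cases n
    simp [Nat.toDigitsCore, natDSum]
    decide
  | succ fuel ih =>
    intro n acc hn
    rw [show Nat.toDigitsCore 10 (fuel + 1 + 1) n acc
        = if n / 10 = 0 then Nat.digitChar (n % 10) :: acc
          else Nat.toDigitsCore 10 (fuel + 1) (n / 10) (Nat.digitChar (n % 10) :: acc)
        from rfl]
    by_cases h0 : n / 10 = 0
    · have hlt : n < 10 := by omega
      rw [if_pos h0]
      rw [natDSum]
      simp only [List.map_cons, List.sum_cons, dchar_val (n % 10) (by omega), dif_pos hlt]
      have : n % 10 = n := Nat.mod_eq_of_lt hlt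
      rw [this]
    · rw [if_neg h0, ih (n / 10) _ (by omega)]
      have h10 : ¬ n < 10 := by omega
      conv_rhs => rw [natDSum]
      rw [dif_neg h10]
      simp only [List.map_cons, List.sum_cons, dchar_val (n % 10) (by omega)]
      push_cast
      ring

lemma strDigitSum_eq (m : Int) (h : 0 ≤ m) : strDigitSum m = (natDSum m.toNat : Int) := by
  unfold strDigitSum
  rw [PySem.Int.toList_toStr]
  unfold PySem.Int.toChars
  rw [if_neg (by omega)]
  unfold Nat.toDigits
  have := core_sum m.toNat m.toNat [] (le_refl _)
  simpa using this

lemma digitLoop_eq (m : Int) (h : 0 ≤ m) : ∀ s, digitLoop s m = s + (natDSum m.toNat : Int) := by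
  induction hm : m.toNat using Nat.strong_induction_on generalizing m with
  | _ t ih =>
    intro s
    rw [digitLoop]
    by_cases h0 : 0 < m
    · rw [if_pos h0]
      have hdiv : PySem.Int.floordiv m 10 = m / 10 := PySem.Int.floordiv_eq_ediv_of_pos (by omega)
      have hmod : PySem.Int.mod m 10 = m % 10 := PySem.Int.mod_eq_emod_of_pos (by omega)
      have hlt : (m / 10).toNat < t := by omega
      rw [hdiv, hmod, ih _ hlt (m / 10) (by omega) rfl]
      subst hm
      conv_rhs => rw [natDSum]
      by_cases hsm : m.toNat < 10
      · rw [dif_pos hsm]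
        have h1 : m / 10 = 0 := by omega
        have h2 : m % 10 = m := by omega
        rw [h1, h2]
        have : natDSum 0 = 0 := by rw [natDSum]; simp
        simp [this]
        omega
      · rw [dif_neg hsm]
        have e1 : (m / 10).toNat = m.toNat / 10 := by omega
        have e2 : m % 10 = ((m.toNat % 10 : Nat) : Int) := by omega
        rw [e1, e2]
        push_cast
        ring
    · rw [if_neg h0]
      have hz : m = 0 := by omega
      subst hz
      have ht : t = 0 := by omega
      subst ht
      rw [natDSum]
      simp

-- ---- the closed-form coefficient list equals the while-loop's list ----

lemma buildSeq_closed (n : Int) : ∀ (seq : List Int) (j : Int), 1 ≤ j →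
    (seq.length : Int) = 3 * j - 2 →
    buildSeq n seq j
      = seq ++ (PySem.List.pyRange j ((if 1 < n then PySem.Int.floordiv (n + 1) 3 else 0) + 1) 1).flatMap
          (fun k => [1, 2 * k, 1]) := by
  intro seq j hj hlen
  induction seq, j using buildSeq.induct n with
  | case1 seq k hlt ih =>
    rw [buildSeq, dif_pos hlt]
    rw [ih (by omega) (by simp; omega)]
    have hk : k < (if 1 < n then PySem.Int.floordiv (n + 1) 3 else 0) + 1 := by
      by_cases h1 : 1 < n
      · rw [if_pos h1]
        rw [PySem.Int.floordiv_eq_ediv_of_pos (by omega)]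
        omega
      · omega
    rw [PySem.List.pyRange_one_cons hk]
    simp
  | case2 seq k hge =>
    rw [buildSeq, dif_neg hge]
    have hk2 : (if 1 < n then PySem.Int.floordiv (n + 1) 3 else 0) + 1 - k ≤ 0 := by
      by_cases h1 : 1 < n
      · rw [if_pos h1, PySem.Int.floordiv_eq_ediv_of_pos (by norm_num)]
        omega
      · rw [if_neg h1]; omega
    have hnil : PySem.List.pyRange k ((if 1 < n then PySem.Int.floordiv (n + 1) 3 else 0) + 1) 1 = [] := by
      rw [PySem.List.pyRange_one, Int.toNat_of_nonpos hk2]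
      simp
    rw [hnil]
    simp

-- ---- backward pair fold = last element of the forward P recurrence ----

lemma pyGetD_last2_snd (pre : List Int) (p2 p1 : Int) :
    PySem.List.pyGetD (pre ++ [p2, p1]) (-1) 0 = p1 := by
  have : pre ++ [p2, p1] = (pre ++ [p2]) ++ [p1] := by simp
  rw [this, PySem.List.pyGetD_neg_one_append_singleton]

lemma pyGetD_last2_fst (pre : List Int) (p2 p1 : Int) :
    PySem.List.pyGetD (pre ++ [p2, p1]) (-2) 0 = p2 := by
  rw [PySem.List.pyGetD_neg_ofNat _ 2 0 (by omega) (by simp)]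
  simp

lemma fwd_eq_back (l : List Int) : ∀ (pre : List Int) (p2 p1 : Int) (Q : List Int),
    PySem.List.pyGetD
      ((l.foldl (fun (PQ : List Int × List Int) a =>
          (PQ.1 ++ [a * PySem.List.pyGetD PQ.1 (-1) 0 + PySem.List.pyGetD PQ.1 (-2) 0],
           PQ.2 ++ [a * PySem.List.pyGetD PQ.2 (-1) 0 + PySem.List.pyGetD PQ.2 (-2) 0]))
        (pre ++ [p2, p1], Q)).1) (-1) 0
    = p1 * (l.foldr (fun a (nd : Int × Int) => (a * nd.1 + nd.2, nd.1)) (1, 0)).1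
      + p2 * (l.foldr (fun a (nd : Int × Int) => (a * nd.1 + nd.2, nd.1)) (1, 0)).2 := by
  induction l with
  | nil => intro pre p2 p1 Q; simp [pyGetD_last2_snd]
  | cons a t ih =>
    intro pre p2 p1 Q
    simp only [List.foldl_cons, List.foldr_cons]
    rw [show pre ++ [p2, p1] ++ [a * PySem.List.pyGetD (pre ++ [p2, p1]) (-1) 0
          + PySem.List.pyGetD (pre ++ [p2, p1]) (-2) 0]
        = (pre ++ [p2]) ++ [p1, a * p1 + p2] by
      rw [pyGetD_last2_snd, pyGetD_last2_fst]; simp]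
    rw [ih]
    ring

-- ---- the numerator is positive (so the divmod digit loop applies) ----

lemma foldr_pos (l : List Int) (h : ∀ a ∈ l, 1 ≤ a) :
    1 ≤ (l.foldr (fun a (nd : Int × Int) => (a * nd.1 + nd.2, nd.1)) (1, 0)).1
    ∧ 0 ≤ (l.foldr (fun a (nd : Int × Int) => (a * nd.1 + nd.2, nd.1)) (1, 0)).2 := by
  induction l with
  | nil => simp
  | cons a t ih =>
    have ht := ih (fun x hx => h x (by simp [hx]))
    have ha : 1 ≤ a := h a (by simp)
    simp only [List.foldr_cons]
    constructor
    · nlinarith [ht.1, ht.2]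
    · exact le_trans (by omega) ht.1

lemma coeffs_pos (m : Int) :
    ∀ a ∈ (2 : Int) :: (PySem.List.pyRange 1 (m + 1) 1).flatMap (fun k => [1, 2 * k, 1]), 1 ≤ a := by
  intro a ha
  rcases List.mem_cons.mp ha with h | h
  · omega
  · rcases List.mem_flatMap.mp h with ⟨k, hk, hak⟩
    have hk1 : 1 ≤ k := (PySem.List.mem_pyRange_one.mp hk).1
    simp at hak
    rcases hak with h | h | h <;> omega

-- ===== VERDICT (by name: the statement is the Claim_ definition above) =====
theorem convergent_spec : Claim_equal_convergent := by
  intro n _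
  show convergent n = convergent_alt n
  unfold convergent convergent_alt
  simp only [List.foldl_reverse]
  rw [buildSeq_closed n [2] 1 (by omega) (by simp)]
  simp only [List.singleton_append]
  set m : Int := if 1 < n then PySem.Int.floordiv (n + 1) 3 else 0 with hm
  set l := (PySem.List.pyRange 1 (m + 1) 1).flatMap (fun k => [1, 2 * k, 1]) with hl
  have hfold := fwd_eq_back ((2 : Int) :: l) [] 0 1 [1, 0]
  simp only [List.nil_append] at hfold
  rw [hfold]
  have hpos := foldr_pos ((2 : Int) :: l) (coeffs_pos m)
  rw [strDigitSum_eq _ (by nlinarith [hpos.1, hpos.2]), digitLoop_eq _ (by nlinarith [hpos.1, hpos.2])]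
  ring_nf
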